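-- pv_equiv track=rewrite | github.com/NutthanichN/grading-helper | week_6/6210546706_lab6.py | front_x
-- ===== SOURCE A (Python) =====
-- def front_x(list):
--     """ This function receive a list of letter then sort it except group that begin with x
--     >>> l = ['mix', 'xyz', 'apple', 'xanadu', 'aardvark']
--     >>> front_x(l)
--     ['xanadu', 'xyz', 'aardvark', 'apple', 'mix']
--     >>> m = ['max', 'ant', 'xyz']
--     >>> front_x(m)
--     ['xyz', 'ant', 'max']
--     >>> b = ['kid', 'child', 'x-ray', 'xyz']
--     >>> front_x(b)
--     ['x-ray', 'xyz', 'child', 'kid']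
--     >>> c = ['abc', 'def', 'ghi', 'jkl']
--     >>> front_x(c)
--     ['abc', 'def', 'ghi', 'jkl']
--     >>> n = ['xa', 'xb', 'xc']
--     >>> front_x(n)
--     ['xa', 'xb', 'xc']
--     """
--     x = []
--     a = []
--     total = []
--     ans = []
--     for i in list:
--         if i[0] == 'x' or i[0] == 'X':
--             x.append(i)
--             x.sort()
--
--         else:
--             a.append(i)
--             a.sort()
--
--     total.append(x)
--     total.append(a)
--     for k in range(len(total)):
--         for m in range(len(total[k])):
--             ans.append(total[k][m])
--
--     return ans
-- ===== SOURCE B (Python) =====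
-- def front_x(list):
--     # One global stable sort with a composite key: x-words (False < True) first,
--     # then alphabetical within each group.
--     return sorted(list, key=lambda w: (w[0] != 'x' and w[0] != 'X', w))
-- ===== Notes on version B (the rewrite author's own statement) =====
-- stated objective: faster
-- what changed: A re-sorts the growing group list after every single append (O(n^2 log n) total) and then copies via an index-nested double loop; B does no partitioning at all: one single stable sort of the whole list under a composite key (not-x flag, word).
import Mathlib
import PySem

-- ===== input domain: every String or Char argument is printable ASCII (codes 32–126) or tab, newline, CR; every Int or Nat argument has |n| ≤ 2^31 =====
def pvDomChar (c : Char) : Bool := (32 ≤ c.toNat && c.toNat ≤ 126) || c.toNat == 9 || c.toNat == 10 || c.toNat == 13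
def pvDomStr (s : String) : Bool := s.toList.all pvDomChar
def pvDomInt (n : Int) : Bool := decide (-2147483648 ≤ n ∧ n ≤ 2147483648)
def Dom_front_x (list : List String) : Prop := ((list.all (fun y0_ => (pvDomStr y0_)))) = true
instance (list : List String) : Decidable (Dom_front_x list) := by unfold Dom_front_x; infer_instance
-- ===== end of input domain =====

-- B replaces A's sort-after-every-append partitioning with ONE stable sort of the
-- whole list under the composite key (not-x flag, word) — objective: faster.

-- ===== PORT A =====
def front_x (list : List String) : List String :=
  let st := list.foldl (fun (st : List String × List String) i =>
    if PySem.Str.pyGet? i 0 == some 'x' || PySem.Str.pyGet? i 0 == some 'X' then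
      (PySem.List.sorted (st.1 ++ [i]) (fun s => s), st.2)
    else
      (st.1, PySem.List.sorted (st.2 ++ [i]) (fun s => s))) ([], [])
  let total : List (List String) := ([] ++ [st.1]) ++ [st.2]
  (PySem.List.pyRange 0 (PySem.List.len total)).foldl (fun ans k =>
    (PySem.List.pyRange 0 (PySem.List.len (PySem.List.pyGetD total k []))).foldl (fun ans m =>
      ans ++ [PySem.List.pyGetD (PySem.List.pyGetD total k []) m ""]) ans) []

-- ===== PORT B =====
-- Python's bool key component (False < True) is ported as the Int 0/1 it compares as.
def notXFlag (w : String) : Int :=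
  if PySem.Str.pyGet? w 0 == some 'x' || PySem.Str.pyGet? w 0 == some 'X' then 0 else 1

def front_x_alt (list : List String) : List String :=
  PySem.List.sorted2 list notXFlag (fun w => w)

-- ===== PRECONDITION & SPEC =====
-- Pre_ excludes lists containing an empty string: there the Python A (and B) raise IndexError on w[0].
def Pre_front_x (list : List String) : Prop := "" ∉ list
instance (list : List String) : Decidable (Pre_front_x list) := by unfold Pre_front_x; infer_instance
def pvWitness_front_x : List String := (["xyz", "ant", "max"])

def Spec_front_x (list : List String) (out : List String) : Prop := out = front_x_alt list
instance (list : List String) (out : List String) : Decidable (Spec_front_x list out) := by unfold Spec_front_x; infer_instance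

-- ===== CLAIM (what is proved, stated in full; the proofs are below) =====
def Claim_equal_front_x : Prop := ∀ (list : List String), Dom_front_x list → Pre_front_x list → Spec_front_x list (front_x list)

-- ===== LEMMAS AND PROOFS =====

def isXWord (w : String) : Bool :=
  PySem.Str.pyGet? w 0 == some 'x' || PySem.Str.pyGet? w 0 == some 'X'

-- re-sorting after an append equals sorting the appended list
theorem sorted_append_sorted (X : List String) (w : String) :
    PySem.List.sorted (PySem.List.sorted X (fun s => s) ++ [w]) (fun s => s)
      = PySem.List.sorted (X ++ [w]) (fun s => s) := by
  apply PySem.List.sorted_eq_sorted_of_perm _ _ _ (fun a b h => h)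
  exact (PySem.List.sorted_perm X (fun s => s) false).append_right [w]

-- loop invariant for A's first loop
theorem loopA_inv (l X A : List String) :
    l.foldl (fun (st : List String × List String) i =>
      if PySem.Str.pyGet? i 0 == some 'x' || PySem.Str.pyGet? i 0 == some 'X' then
        (PySem.List.sorted (st.1 ++ [i]) (fun s => s), st.2)
      else
        (st.1, PySem.List.sorted (st.2 ++ [i]) (fun s => s)))
      (PySem.List.sorted X (fun s => s), PySem.List.sorted A (fun s => s))
    = (PySem.List.sorted (X ++ l.filter (fun w => isXWord w)) (fun s => s),
       PySem.List.sorted (A ++ l.filter (fun w => !isXWord w)) (fun s => s)) := by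
  induction l generalizing X A with
  | nil => simp
  | cons w t ih =>
    simp only [List.foldl_cons]
    by_cases h : isXWord w
    · have hc : (PySem.Str.pyGet? w 0 == some 'x' || PySem.Str.pyGet? w 0 == some 'X') = true := h
      rw [if_pos (by simpa using hc)]
      simp only [sorted_append_sorted]
      rw [ih (X ++ [w]) A]
      simp [h]
    · have hc : (PySem.Str.pyGet? w 0 == some 'x' || PySem.Str.pyGet? w 0 == some 'X') = false := by
        simpa [isXWord] using h
      rw [if_neg (by simp only [hc]; exact Bool.false_ne_true)]
      simp only [sorted_append_sorted]
      rw [ih X (A ++ [w])]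
      simp [h]

-- the inner copying loop appends the whole list
theorem inner_loop (ys acc : List String) :
    (PySem.List.pyRange 0 (PySem.List.len ys)).foldl
      (fun ans m => ans ++ [PySem.List.pyGetD ys m ""]) acc = acc ++ ys := by
  rw [PySem.List.foldl_append_singleton_eq_map, PySem.List.map_pyGetD_pyRange_zero]

-- A's copying double loop over total = [x, a] produces x ++ a
theorem outer_loop (x a : List String) :
    (PySem.List.pyRange 0 (PySem.List.len (([] ++ [x]) ++ [a]))).foldl (fun ans k =>
      (PySem.List.pyRange 0 (PySem.List.len (PySem.List.pyGetD (([] ++ [x]) ++ [a]) k []))).foldl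
        (fun ans m => ans ++ [PySem.List.pyGetD (PySem.List.pyGetD (([] ++ [x]) ++ [a]) k []) m ""]) ans)
      [] = x ++ a := by
  have hl : (([] ++ [x]) ++ [a] : List (List String)) = [x, a] := by simp
  rw [hl]
  have hr : PySem.List.pyRange 0 (PySem.List.len ([x, a] : List (List String))) = [0, 1] := by
    simp [PySem.List.len]; decide
  rw [hr]
  simp only [List.foldl_cons, List.foldl_nil]
  have g0 : PySem.List.pyGetD ([x, a] : List (List String)) 0 [] = x := by
    simp [PySem.List.pyGetD, PySem.List.pyGet?, PySem.List.pyIdx?]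
  have g1 : PySem.List.pyGetD ([x, a] : List (List String)) 1 [] = a := by
    simp [PySem.List.pyGetD, PySem.List.pyGet?, PySem.List.pyIdx?]
  rw [g0, g1, inner_loop, inner_loop]
  simp

-- A computes sorted(x-words) ++ sorted(others)
theorem front_x_eq_parts (l : List String) :
    front_x l = PySem.List.sorted (l.filter (fun w => isXWord w)) (fun s => s)
      ++ PySem.List.sorted (l.filter (fun w => !isXWord w)) (fun s => s) := by
  unfold front_x
  have h := loopA_inv l [] []
  simp only [List.nil_append] at h
  have h0 : PySem.List.sorted ([] : List String) (fun s => s) = [] := rfl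
  rw [h0] at h
  rw [h, outer_loop]

-- B's composite-key comparison, as sorted2 unfolds to
def lt2 (a b : String) : Bool :=
  decide (notXFlag a < notXFlag b) || !decide (notXFlag b < notXFlag a) && decide (a < b)

theorem insertBy_congr {α : Type} (before before' : α → α → Bool) (x : α) (l : List α)
    (h : ∀ a ∈ l, before x a = before' x a) :
    PySem.List.insertBy before x l = PySem.List.insertBy before' x l := by
  induction l with
  | nil => rfl
  | cons y t ih =>
    simp only [PySem.List.insertBy]
    rw [h y (by simp)]
    by_cases hb : before' x y
    · simp [hb]
    · simp [hb, ih (fun a ha => h a (by simp [ha]))]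

theorem insertBy_append_true {α : Type} (before : α → α → Bool) (x : α) (l r : List α)
    (h : ∀ a ∈ r, before x a = true) :
    PySem.List.insertBy before x (l ++ r) = PySem.List.insertBy before x l ++ r := by
  induction l with
  | nil =>
    cases r with
    | nil => rfl
    | cons a t => simp [PySem.List.insertBy, h a (by simp)]
  | cons y t ih =>
    simp only [List.cons_append, PySem.List.insertBy]
    by_cases hb : before x y
    · simp [hb]
    · simp [hb, ih]

theorem insertBy_append_false {α : Type} (before : α → α → Bool) (x : α) (l r : List α)
    (h : ∀ a ∈ l, before x a = false) :
    PySem.List.insertBy before x (l ++ r) = l ++ PySem.List.insertBy before x r := by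
  induction l with
  | nil => rfl
  | cons y t ih =>
    simp only [List.cons_append, PySem.List.insertBy]
    rw [h y (by simp)]
    simp [ih (fun a ha => h a (by simp [ha]))]

-- sorting after an append is inserting into the sorted list
theorem sorted_append_one (X : List String) (w : String) :
    PySem.List.sorted (X ++ [w]) (fun s => s)
      = PySem.List.insertBy (fun a b => decide (a < b)) w (PySem.List.sorted X (fun s => s)) := by
  rw [PySem.List.sorted_eq_foldl_insertBy, PySem.List.sorted_eq_foldl_insertBy, List.foldl_append]
  rfl

theorem notXFlag_of_x (w : String) (h : isXWord w = true) : notXFlag w = 0 := by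
  simp only [isXWord] at h; simp only [notXFlag, h, if_pos]

theorem notXFlag_of_not (w : String) (h : isXWord w = false) : notXFlag w = 1 := by
  simp only [isXWord] at h; simp only [notXFlag, h]; rfl

-- loop invariant for B's single insertion sort under the composite key
theorem loopB_inv (l X A : List String)
    (hX : ∀ w ∈ X, isXWord w = true) (hA : ∀ w ∈ A, isXWord w = false) :
    l.foldl (fun acc x => PySem.List.insertBy lt2 x acc)
      (PySem.List.sorted X (fun s => s) ++ PySem.List.sorted A (fun s => s))
    = PySem.List.sorted (X ++ l.filter (fun w => isXWord w)) (fun s => s)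
      ++ PySem.List.sorted (A ++ l.filter (fun w => !isXWord w)) (fun s => s) := by
  induction l generalizing X A with
  | nil => simp
  | cons w t ih =>
    simp only [List.foldl_cons]
    by_cases h : isXWord w
    · have hstep : PySem.List.insertBy lt2 w
          (PySem.List.sorted X (fun s => s) ++ PySem.List.sorted A (fun s => s))
          = PySem.List.sorted (X ++ [w]) (fun s => s) ++ PySem.List.sorted A (fun s => s) := by
        rw [insertBy_append_true lt2 w _ _ (by
          intro a ha
          have haA : isXWord a = false := hA a ((PySem.List.mem_sorted _ _ _ _).1 ha)
          simp [lt2, notXFlag_of_x w h, notXFlag_of_not a haA])]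
        rw [insertBy_congr lt2 (fun a b => decide (a < b)) w _ (by
          intro a ha
          have haX : isXWord a = true := hX a ((PySem.List.mem_sorted _ _ _ _).1 ha)
          simp [lt2, notXFlag_of_x w h, notXFlag_of_x a haX])]
        rw [sorted_append_one]
      rw [hstep, ih (X ++ [w]) A (by
          intro v hv
          rcases List.mem_append.1 hv with hv | hv
          · exact hX v hv
          · simp at hv; simpa [hv] using h) hA]
      simp [h]
    · have hstep : PySem.List.insertBy lt2 w
          (PySem.List.sorted X (fun s => s) ++ PySem.List.sorted A (fun s => s))
          = PySem.List.sorted X (fun s => s) ++ PySem.List.sorted (A ++ [w]) (fun s => s) := by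
        have h' : isXWord w = false := by simpa using h
        rw [insertBy_append_false lt2 w _ _ (by
          intro a ha
          have haX : isXWord a = true := hX a ((PySem.List.mem_sorted _ _ _ _).1 ha)
          simp [lt2, notXFlag_of_not w h', notXFlag_of_x a haX])]
        rw [insertBy_congr lt2 (fun a b => decide (a < b)) w _ (by
          intro a ha
          have haA : isXWord a = false := hA a ((PySem.List.mem_sorted _ _ _ _).1 ha)
          simp [lt2, notXFlag_of_not w h', notXFlag_of_not a haA])]
        rw [sorted_append_one]
      rw [hstep, ih X (A ++ [w]) hX (by
          intro v hv
          rcases List.mem_append.1 hv with hv | hv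
          · exact hA v hv
          · simp at hv; simpa [hv] using h)]
      simp [h]

-- B computes the same concatenation
theorem front_x_alt_eq_parts (l : List String) :
    front_x_alt l = PySem.List.sorted (l.filter (fun w => isXWord w)) (fun s => s)
      ++ PySem.List.sorted (l.filter (fun w => !isXWord w)) (fun s => s) := by
  have hunf : front_x_alt l = l.foldl (fun acc x => PySem.List.insertBy lt2 x acc) [] := rfl
  rw [hunf]
  have h := loopB_inv l [] [] (by simp) (by simp)
  simpa using h

-- ===== VERDICT (by name: the statement is the Claim_ definition above) =====
theorem front_x_spec : Claim_equal_front_x := by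
  intro list _ _
  show front_x list = front_x_alt list
  rw [front_x_eq_parts, front_x_alt_eq_parts]
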